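-- pv_equiv track=rewrite | github.com/asmit404/GFG_Solutions | Ticket Counter.py | distributeTicket
-- ===== SOURCE A (Python) =====
-- def distributeTicket(N: int, K: int) -> int:
--     arr = [i for i in range(1, N+1)]
--     def ticket(arr, k):
--         if len(arr) <= k:
--             return arr[-1]
--         var = ticket(arr[k:][::-1], k)
--         return var
--     return ticket(arr, K)
-- ===== SOURCE B (Python) =====
-- def distributeTicket(N: int, K: int) -> int:
--     # The survivors always form a contiguous block [lo, hi], alternately
--     # read ascending/descending; update the bounds in O(1) per round.
--     lo, hi, asc = 1, N, True
--     while hi - lo + 1 > K: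
--         if asc:
--             lo += K
--         else:
--             hi -= K
--         asc = not asc
--     return hi if asc else lo
-- ===== Notes on version B (the rewrite author's own statement) =====
-- stated objective: faster
-- what changed: Replaces the recursive slice-and-reverse simulation of the whole list with O(1)-per-round updates of a contiguous range [lo,hi] plus a direction flag, never materialising the list.
import Mathlib
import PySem

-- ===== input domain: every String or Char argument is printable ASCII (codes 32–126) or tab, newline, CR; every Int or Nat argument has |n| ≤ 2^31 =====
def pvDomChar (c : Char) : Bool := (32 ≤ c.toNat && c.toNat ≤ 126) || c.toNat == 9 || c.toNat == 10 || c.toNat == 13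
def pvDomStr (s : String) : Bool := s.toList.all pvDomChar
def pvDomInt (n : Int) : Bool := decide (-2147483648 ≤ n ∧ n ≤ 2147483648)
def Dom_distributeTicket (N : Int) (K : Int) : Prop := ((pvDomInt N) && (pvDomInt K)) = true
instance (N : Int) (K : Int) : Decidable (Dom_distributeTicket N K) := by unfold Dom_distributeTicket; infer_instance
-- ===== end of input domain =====

-- B replaces A's recursive slice-and-reverse list simulation by O(1)-per-round
-- updates of a contiguous range [lo,hi] with a direction flag (faster, asymptotically).


-- ===== PORT A =====
-- ticket(arr, k): arr[k:] is PySem.List.slice arr (some k) none; [::-1] is reverse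
-- (PySem.List.slice?_none_none_neg_one). arr[-1] on an empty arr is an IndexError,
-- excluded by Pre_; the 'else 0' branch (k ≤ 0) is where the Python recurses forever,
-- also excluded by Pre_ — both guards only make the port total.
def ticketA (k : Int) (arr : List Int) : Int :=
  if (arr.length : Int) ≤ k then (PySem.List.pyGet? arr (-1)).getD 0
  else if _h : 1 ≤ k then ticketA k ((PySem.List.slice arr (some k) none).reverse)
  else 0
termination_by arr.length
decreasing_by
  simp only [List.length_reverse, PySem.List.slice_from _ (by omega : (0:Int) ≤ k),
    List.length_drop]
  omega

def distributeTicket (N : Int) (K : Int) : Int :=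
  ticketA K (PySem.List.pyRange 1 (N + 1) 1)

-- ===== PORT B =====
-- while hi - lo + 1 > K: shrink the range from the current front, flip direction.
-- The 'else 0' branch (K ≤ 0) is where the Python loop never terminates, excluded by Pre_.
def loopB (K lo hi : Int) (asc : Bool) : Int :=
  if hi - lo + 1 > K then
    if _h : 1 ≤ K then
      if asc then loopB K (lo + K) hi false else loopB K lo (hi - K) true
    else 0
  else if asc then hi else lo
termination_by (hi - lo).toNat
decreasing_by all_goals omega

def distributeTicket_alt (N : Int) (K : Int) : Int :=
  loopB K 1 N true

-- ===== PRECONDITION & SPEC =====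
-- Pre_ excludes N ≤ 0 (arr is empty, arr[-1] raises IndexError) and K ≤ 0
-- (A recurses forever: the list never shrinks), i.e. exactly where A does not return.
def Pre_distributeTicket (N : Int) (K : Int) : Prop := 1 ≤ N ∧ 1 ≤ K
instance (N : Int) (K : Int) : Decidable (Pre_distributeTicket N K) := by
  unfold Pre_distributeTicket; infer_instance

def pvWitness_distributeTicket : Int × Int := (7, 3)

def Spec_distributeTicket (N : Int) (K : Int) (out : Int) : Prop := out = distributeTicket_alt N K
instance (N : Int) (K : Int) (out : Int) : Decidable (Spec_distributeTicket N K out) := by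
  unfold Spec_distributeTicket; infer_instance

-- ===== CLAIM (what is proved, stated in full; the proofs are below) =====
def Claim_equal_distributeTicket : Prop := ∀ (N : Int) (K : Int), Dom_distributeTicket N K → Pre_distributeTicket N K → Spec_distributeTicket N K (distributeTicket N K)

-- ===== LEMMAS AND PROOFS =====

-- last element of a nonempty ascending range
lemma getLast?_pyRange (a b : Int) (h : a ≤ b) :
    (PySem.List.pyRange a (b + 1) 1).getLast? = some b := by
  rw [PySem.List.pyRange_one_succ_right h]
  exact List.getLast?_concat

-- first element of a nonempty ascending range
lemma head?_pyRange (a b : Int) (h : a ≤ b) :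
    (PySem.List.pyRange a (b + 1) 1).head? = some a := by
  rw [PySem.List.pyRange_one_cons (by omega : a < b + 1)]
  rfl

-- dropping k elements from the front of an ascending range
lemma drop_pyRange (a b k : Int) (h0 : 0 ≤ k) (h : a + k ≤ b) :
    (PySem.List.pyRange a b 1).drop k.toNat = PySem.List.pyRange (a + k) b 1 := by
  rw [PySem.List.pyRange_one_append a (a + k) b (by omega) h]
  have hl : (PySem.List.pyRange a (a + k) 1).length = k.toNat := by
    rw [PySem.List.length_pyRange_one]; omega
  rw [← hl, List.drop_left]

-- dropping k elements from the front of a reversed ascending range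
lemma drop_reverse_pyRange (a b k : Int) (h0 : 0 ≤ k) (h : a + k ≤ b + 1) :
    ((PySem.List.pyRange a (b + 1) 1).reverse).drop k.toNat
      = (PySem.List.pyRange a (b + 1 - k) 1).reverse := by
  rw [PySem.List.pyRange_one_append a (b + 1 - k) (b + 1) (by omega) (by omega),
      List.reverse_append]
  have hl : (PySem.List.pyRange (b + 1 - k) (b + 1) 1).reverse.length = k.toNat := by
    rw [List.length_reverse, PySem.List.length_pyRange_one]; omega
  rw [← hl, List.drop_left]

-- the core invariant: ticketA on the contiguous block (in either direction) is loopB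
lemma ticketA_eq_loopB (k : Int) (hk : 1 ≤ k) :
    ∀ (n : Nat) (lo hi : Int), (hi - lo).toNat = n → lo ≤ hi →
      ticketA k (PySem.List.pyRange lo (hi + 1) 1) = loopB k lo hi true ∧
      ticketA k ((PySem.List.pyRange lo (hi + 1) 1).reverse) = loopB k lo hi false := by
  intro n
  induction n using Nat.strong_induction_on with
  | _ n ih =>
    intro lo hi hn hle
    have hlen : ((PySem.List.pyRange lo (hi + 1) 1).length : Int) = hi + 1 - lo := by
      rw [PySem.List.length_pyRange_one]; omega
    by_cases hsmall : hi - lo + 1 ≤ k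
    · -- base: the block fits in one round
      constructor <;>
        · rw [ticketA.eq_def, loopB.eq_def]
          simp only [List.length_reverse, hlen, PySem.List.pyGet?_neg_one]
          rw [if_pos (by omega), if_neg (by omega)]
          first
            | rw [getLast?_pyRange lo hi hle]; rfl
            | rw [List.getLast?_reverse, head?_pyRange lo hi hle]; rfl
    · -- step: drop k from the current front, flip direction
      constructor
      · rw [ticketA.eq_def, loopB.eq_def]
        rw [if_neg (by simp only [hlen]; omega), dif_pos hk,
            if_pos (by omega), dif_pos hk, if_pos rfl,
            PySem.List.slice_from _ (by omega : (0:Int) ≤ k),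
            drop_pyRange lo (hi + 1) k (by omega) (by omega)]
        exact (ih (hi - (lo + k)).toNat (by omega) (lo + k) hi rfl (by omega)).2
      · rw [ticketA.eq_def, loopB.eq_def]
        rw [if_neg (by simp only [List.length_reverse, hlen]; omega), dif_pos hk,
            if_pos (by omega), dif_pos hk, if_neg (by simp),
            PySem.List.slice_from _ (by omega : (0:Int) ≤ k),
            drop_reverse_pyRange lo hi k (by omega) (by omega), List.reverse_reverse,
            show hi + 1 - k = hi - k + 1 by ring]
        exact (ih (hi - k - lo).toNat (by omega) lo (hi - k) rfl (by omega)).1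

-- ===== VERDICT (by name: the statement is the Claim_ definition above) =====
theorem distributeTicket_spec : Claim_equal_distributeTicket := by
  intro N K _ hpre
  obtain ⟨hN, hK⟩ := hpre
  unfold Spec_distributeTicket distributeTicket distributeTicket_alt
  exact (ticketA_eq_loopB K hK (N - 1).toNat 1 N (by omega) (by omega)).1
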